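-- pv_equiv track=rewrite | github.com/seungdeng/backjune | 프로그래머스/1/176963. 추억 점수/추억 점수.py | solution
-- ===== SOURCE A (Python) =====
-- def solution(name, yearning, photo):
--
--     answer = []
--     dt = dict(zip(name, yearning))
--
--     for i in photo:
--         temp = list(set(name) & set(i))
--         exist = sum([dt[k] for k in temp if k in dt])
--         answer.append(exist)
--
--     return answer
-- ===== SOURCE B (Python) =====
-- def solution(name, yearning, photo):
--     dt = dict(zip(name, yearning))
--     occ = {}
--     for idx, ph in enumerate(photo):
--         for k in set(ph):
--             occ.setdefault(k, []).append(idx)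
--     answer = [0] * len(photo)
--     for person, score in dt.items():
--         for idx in occ.get(person, ()):
--             answer[idx] += score
--     return answer
-- ===== Notes on version B (the rewrite author's own statement) =====
-- stated objective: faster
-- what changed: Replaces A's per-photo rebuild of set(name) and set intersection with a single inverted index (person -> photo indices) built in one pass and scattered once into a pre-sized answer list.
import Mathlib
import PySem

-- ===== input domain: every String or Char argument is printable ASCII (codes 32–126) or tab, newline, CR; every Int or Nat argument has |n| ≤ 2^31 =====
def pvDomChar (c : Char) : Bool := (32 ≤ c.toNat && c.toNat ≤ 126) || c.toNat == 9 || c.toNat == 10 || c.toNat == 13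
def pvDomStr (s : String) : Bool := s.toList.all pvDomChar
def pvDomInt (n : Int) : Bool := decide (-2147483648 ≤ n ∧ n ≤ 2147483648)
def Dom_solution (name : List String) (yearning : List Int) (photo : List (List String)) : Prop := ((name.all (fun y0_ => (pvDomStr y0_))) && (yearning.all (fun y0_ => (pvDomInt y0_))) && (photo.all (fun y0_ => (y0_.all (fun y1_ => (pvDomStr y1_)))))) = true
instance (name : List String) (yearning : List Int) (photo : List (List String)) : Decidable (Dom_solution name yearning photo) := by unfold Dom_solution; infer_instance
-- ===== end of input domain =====

-- B replaces A's per-photo rebuild of set(name) and set intersection by a single inverted index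
-- (person -> indices of photos containing them) scattered once into a pre-sized answer list.

-- ===== PORT A =====
-- answer = []; dt = dict(zip(name, yearning));
-- for i in photo: temp = list(set(name) & set(i)); exist = sum([dt[k] for k in temp if k in dt]); answer.append(exist)
-- (the set-iteration order is consumed only by an integer sum, which is order-independent)
def solution (name : List String) (yearning : List Int) (photo : List (List String)) : List Int :=
  let dt : PySem.Dict String Int := PySem.Dict.ofList (name.zip yearning)
  photo.foldl (fun answer i =>
    let temp : List String := PySem.Set.inter (PySem.Set.ofList name) (PySem.Set.ofList i)
    let exist : Int := ((temp.filter (fun k => dt.contains k)).map (fun k => dt.getD k 0)).sum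
    answer ++ [exist]) []

-- ===== PORT B =====
-- dt = dict(zip(name, yearning))
-- occ = {};  for idx, ph in enumerate(photo):  for k in set(ph): occ.setdefault(k, []).append(idx)
-- answer = [0]*len(photo)
-- for person, score in dt.items():  for idx in occ.get(person, ()): answer[idx] += score
-- (occ is only looked up afterwards, so the set(ph) iteration order is immaterial; each index list is
--  appended in photo order.  idx comes from enumerate(photo), so 0 ≤ idx < len(photo) and '.toNat' is exact.)
def solution_alt (name : List String) (yearning : List Int) (photo : List (List String)) : List Int :=
  let dt : PySem.Dict String Int := PySem.Dict.ofList (name.zip yearning)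
  let occ : PySem.Dict String (List Int) :=
    (PySem.List.enumerate photo).foldl (fun occ p =>
      (PySem.Set.ofList p.2).foldl (fun occ k => occ.modify k [] (· ++ [p.1])) occ)
      PySem.Dict.empty
  dt.items.foldl (fun answer ps =>
    (occ.getD ps.1 []).foldl (fun answer idx =>
      answer.set idx.toNat (answer.getD idx.toNat 0 + ps.2)) answer)
    (List.replicate photo.length 0)

-- ===== PRECONDITION & SPEC =====
def Spec_solution (name : List String) (yearning : List Int) (photo : List (List String)) (out : List Int) : Prop := out = solution_alt name yearning photo
instance (name : List String) (yearning : List Int) (photo : List (List String)) (out : List Int) : Decidable (Spec_solution name yearning photo out) := by unfold Spec_solution; infer_instance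

-- ===== CLAIM (what is proved, stated in full; the proofs are below) =====
def Claim_equal_solution : Prop := ∀ (name : List String) (yearning : List Int) (photo : List (List String)), Dom_solution name yearning photo → Spec_solution name yearning photo (solution name yearning photo)

-- ===== LEMMAS AND PROOFS =====

-- keys of dict(zip(name, yearning)) are exactly the distinct zipped names
theorem mem_keys_ofList {κ ν : Type} [BEq κ] [LawfulBEq κ] (ps : List (κ × ν)) (k : κ) :
    k ∈ (PySem.Dict.ofList ps).keys ↔ k ∈ ps.map (·.1) := by
  have h : (PySem.Dict.ofList ps).keys = PySem.Set.update (PySem.Dict.empty : PySem.Dict κ ν).keys (ps.map (·.1)) :=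
    PySem.Dict.keys_foldl_insert_key ps (·.1) (fun d p => p.2) PySem.Dict.empty
  rw [h]
  simp only [PySem.Dict.keys_empty]
  exact PySem.Set.mem_ofList _ _

-- the per-photo value of A equals the restriction of dt's items to that photo
theorem core (name : List String) (yearning : List Int) (ph : List String) :
    (((PySem.Set.inter (PySem.Set.ofList name) (PySem.Set.ofList ph)).filter
        (fun k => (PySem.Dict.ofList (name.zip yearning)).contains k)).map
        (fun k => (PySem.Dict.ofList (name.zip yearning)).getD k 0)).sum
    = ((((PySem.Dict.ofList (name.zip yearning)).items.filter
        (fun ps => decide (ps.1 ∈ ph))).map (·.2)).sum) := by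
  set dt := PySem.Dict.ofList (name.zip yearning) with hdt
  have hnd : dt.keys.Nodup := PySem.Dict.nodup_keys_ofList _
  rw [PySem.Dict.items_eq_map_keys dt hnd 0]
  rw [List.filter_map, List.map_map]
  have hmapeq : ((fun (p : String × Int) => p.2) ∘ fun k => (k, dt.getD k 0)) = fun k => dt.getD k 0 := rfl
  rw [hmapeq]
  -- both sides are sums of (getD · 0) over two nodup lists with equal membership
  apply List.Perm.sum_eq
  apply List.Perm.map
  apply (List.perm_ext_iff_of_nodup ?_ ?_).mpr
  · intro k
    have hname : dt.contains k = true → k ∈ name := by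
      intro hc
      have hk := (mem_keys_ofList (name.zip yearning) k).mp
        ((PySem.Dict.contains_iff_mem_keys dt k).mp hc)
      rcases List.mem_map.mp hk with ⟨p, hp, hpk⟩
      obtain ⟨a, b⟩ := p
      cases hpk
      exact (List.of_mem_zip hp).1
    simp only [List.mem_filter, PySem.Set.inter, Function.comp_apply, decide_eq_true_eq]
    constructor
    · rintro ⟨⟨_, hph⟩, hc⟩
      refine ⟨(PySem.Dict.contains_iff_mem_keys dt k).mp hc, ?_⟩
      exact (PySem.Set.mem_ofList ph k).mp (List.contains_iff_mem.mp hph)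
    · rintro ⟨hk, hph⟩
      have hc : dt.contains k = true := (PySem.Dict.contains_iff_mem_keys dt k).mpr hk
      refine ⟨⟨(PySem.Set.mem_ofList name k).mpr (hname hc), ?_⟩, hc⟩
      exact List.contains_iff_mem.mpr ((PySem.Set.mem_ofList ph k).mpr hph)
  · exact ((PySem.Set.nodup_ofList name).filter _).filter _
  · exact hnd.filter _

-- one photo's contribution to the index: append idx once per occurrence of k in s
theorem inner_getD (s : List String) (d : PySem.Dict String (List Int)) (i : Int) (k : String) :
    (s.foldl (fun d k' => d.modify k' [] (· ++ [i])) d).getD k []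
    = d.getD k [] ++ List.replicate (s.count k) i := by
  induction s generalizing d with
  | nil => simp
  | cons a t ih =>
    rw [List.foldl_cons, ih, PySem.Dict.getD_modify]
    by_cases h : k = a
    · subst h
      rw [if_pos rfl, List.count_cons_self, List.replicate_succ, List.append_assoc]
      rfl
    · rw [if_neg h, List.count_cons, if_neg (by simpa using Ne.symm h), add_zero]

-- the inverted index: occ[k] is the (ordered) list of indices of the pairs whose photo contains k
theorem build_getD (L : List (Int × List String)) (d : PySem.Dict String (List Int)) (k : String) :
    (L.foldl (fun occ p =>
        (PySem.Set.ofList p.2).foldl (fun occ k' => occ.modify k' [] (· ++ [p.1])) occ) d).getD k []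
    = d.getD k [] ++ (L.filter (fun p => decide (k ∈ p.2))).map (·.1) := by
  induction L generalizing d with
  | nil => simp
  | cons p t ih =>
    rw [List.foldl_cons, ih, inner_getD]
    have hcnt : (PySem.Set.ofList p.2).count k = if k ∈ p.2 then 1 else 0 := by
      rw [List.Nodup.count (PySem.Set.nodup_ofList p.2)]
      simp [PySem.Set.mem_ofList]
    rw [hcnt, List.filter_cons]
    by_cases h : k ∈ p.2 <;> simp [h]

-- scattering v at the positions of L adds v * (multiplicity of the position) pointwise
theorem scatter_getD (v : Int) (L : List Int) (ans : List Int)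
    (hb : ∀ i ∈ L, 0 ≤ i ∧ i.toNat < ans.length) :
    (L.foldl (fun ans idx => ans.set idx.toNat (ans.getD idx.toNat 0 + v)) ans).length = ans.length ∧
    ∀ (jn : Nat), jn < ans.length →
      (L.foldl (fun ans idx => ans.set idx.toNat (ans.getD idx.toNat 0 + v)) ans).getD jn 0
      = ans.getD jn 0 + v * (L.count ((jn : Nat) : Int)) := by
  induction L generalizing ans with
  | nil => simp
  | cons i t ih =>
    obtain ⟨hi0, hilt⟩ := hb i (List.mem_cons_self)
    have hlen : (ans.set i.toNat (ans.getD i.toNat 0 + v)).length = ans.length := by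
      simp
    obtain ⟨ihlen, ihpt⟩ := ih (ans.set i.toNat (ans.getD i.toNat 0 + v))
      (fun j hj => by rw [hlen]; exact hb j (List.mem_cons_of_mem _ hj))
    rw [List.foldl_cons]
    refine ⟨by rw [ihlen, hlen], ?_⟩
    intro jn hjn
    rw [ihpt jn (by rw [hlen]; exact hjn), List.count_cons]
    have hset : (ans.set i.toNat (ans.getD i.toNat 0 + v)).getD jn 0
        = if i.toNat = jn then ans.getD jn 0 + v else ans.getD jn 0 := by
      by_cases h : i.toNat = jn
      · subst h
        rw [if_pos rfl, List.getD_eq_getElem _ _ (by simpa using hilt),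
          List.getElem_set_self (by simpa using hilt)]
      · rw [if_neg h]
        by_cases hr : jn < ans.length
        · rw [List.getD_eq_getElem _ _ (by simpa using hr), List.getD_eq_getElem _ _ hr,
            List.getElem_set_ne h]
        · rw [List.getD_eq_default _ _ (by simpa using Nat.le_of_not_lt hr),
            List.getD_eq_default _ _ (Nat.le_of_not_lt hr)]
    rw [hset]
    by_cases h : i.toNat = jn
    · have he : i = ((jn : Nat) : Int) := by omega
      rw [if_pos h, if_pos (by simpa using he)]
      push_cast
      ring
    · have he : i ≠ ((jn : Nat) : Int) := by omega
      rw [if_neg h, if_neg (by simpa using he)]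
      push_cast
      ring

-- the whole scatter loop over the dict items, pointwise
theorem items_scatter_getD (photo : List (List String)) (occ : PySem.Dict String (List Int))
    (hocc : ∀ (k : String) (i : Int), i ∈ occ.getD k [] → 0 ≤ i ∧ i.toNat < photo.length)
    (hcnt : ∀ (k : String) (jn : Nat), jn < photo.length →
      (occ.getD k []).count ((jn : Nat) : Int) = if k ∈ photo.getD jn [] then 1 else 0)
    (items : List (String × Int)) (ans : List Int) (hlen : ans.length = photo.length) :
    (items.foldl (fun answer ps =>
      (occ.getD ps.1 []).foldl (fun answer idx =>
        answer.set idx.toNat (answer.getD idx.toNat 0 + ps.2)) answer) ans).length = ans.length ∧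
    ∀ (jn : Nat), jn < ans.length →
      (items.foldl (fun answer ps =>
        (occ.getD ps.1 []).foldl (fun answer idx =>
          answer.set idx.toNat (answer.getD idx.toNat 0 + ps.2)) answer) ans).getD jn 0
      = ans.getD jn 0 + ((items.filter (fun ps => decide (ps.1 ∈ photo.getD jn []))).map (·.2)).sum := by
  induction items generalizing ans with
  | nil => simp
  | cons ps t ih =>
    obtain ⟨slen, spt⟩ := scatter_getD ps.2 (occ.getD ps.1 []) ans
      (fun i hi => by rw [hlen]; exact hocc ps.1 i hi)
    obtain ⟨ihlen, ihpt⟩ := ih (((occ.getD ps.1 []).foldl (fun answer idx =>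
        answer.set idx.toNat (answer.getD idx.toNat 0 + ps.2)) ans)) (by rw [slen, hlen])
    rw [List.foldl_cons]
    refine ⟨by rw [ihlen, slen], ?_⟩
    intro jn hjn
    rw [ihpt jn (by rw [slen]; exact hjn), spt jn hjn,
      hcnt ps.1 jn (by rw [← hlen]; exact hjn), List.filter_cons]
    by_cases h : ps.1 ∈ photo.getD jn []
    · rw [if_pos h]
      simp only [h, decide_true, if_true, List.map_cons, List.sum_cons]
      push_cast
      ring
    · rw [if_neg h]
      simp only [h, decide_false, Bool.false_eq_true, if_false]
      push_cast
      ring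

-- membership in the index list, with bounds
theorem R_mem (photo : List (List String)) (k : String) (i : Int)
    (h : i ∈ ((PySem.List.enumerate photo).filter (fun p => decide (k ∈ p.2))).map (·.1)) :
    0 ≤ i ∧ i.toNat < photo.length ∧ k ∈ photo.getD i.toNat [] := by
  rcases List.mem_map.mp h with ⟨p, hp, hpi⟩
  rcases List.mem_filter.mp hp with ⟨hpe, hpk⟩
  rcases (PySem.List.mem_enumerate_iff photo 0 p).mp hpe with ⟨j, hj, hpeq⟩
  subst hpeq
  simp only [zero_add] at hpi hpk
  have hij : i = ((j : Nat) : Int) := hpi.symm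
  have hjt : i.toNat = j := by omega
  refine ⟨by omega, by omega, ?_⟩
  rw [hjt, List.getD_eq_getElem _ _ hj]
  simpa using hpk

-- the index lists are strictly increasing, hence duplicate-free
theorem R_nodup (photo : List (List String)) (k : String) :
    (((PySem.List.enumerate photo).filter (fun p => decide (k ∈ p.2))).map (·.1)).Nodup := by
  have hpw : ((PySem.List.enumerate photo).filter (fun p => decide (k ∈ p.2))).Pairwise
      (fun p q => p.1 < q.1) :=
    (PySem.List.pairwise_lt_enumerate photo 0).sublist (List.filter_sublist)
  have hm : (((PySem.List.enumerate photo).filter (fun p => decide (k ∈ p.2))).map (·.1)).Pairwise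
      (fun a b => a < b) := List.pairwise_map.mpr hpw
  exact hm.imp ne_of_lt

-- multiplicity of an in-range index in the index list: 1 iff the photo contains k
theorem R_count (photo : List (List String)) (k : String) (jn : Nat) (h : jn < photo.length) :
    ((((PySem.List.enumerate photo).filter (fun p => decide (k ∈ p.2))).map (·.1)).count
      ((jn : Nat) : Int)) = if k ∈ photo.getD jn [] then 1 else 0 := by
  rw [List.Nodup.count (R_nodup photo k)]
  congr 1
  simp only [eq_iff_iff]
  constructor
  · intro hm
    exact (R_mem photo k _ hm).2.2
  · intro hk
    apply List.mem_map.mpr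
    refine ⟨((( jn : Nat) : Int), photo[jn]), ?_, rfl⟩
    apply List.mem_filter.mpr
    refine ⟨?_, ?_⟩
    · apply (PySem.List.mem_enumerate_iff photo 0 _).mpr
      exact ⟨jn, h, by simp⟩
    · rw [List.getD_eq_getElem _ _ h] at hk
      simpa using hk

-- ===== VERDICT (by name: the statement is the Claim_ definition above) =====
theorem solution_spec : Claim_equal_solution := by
  intro name yearning photo _
  unfold Spec_solution
  simp only [solution, solution_alt]
  rw [PySem.List.foldl_append_singleton_eq_map]
  simp only [List.nil_append]
  set dt := PySem.Dict.ofList (name.zip yearning) with hdt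
  set occ : PySem.Dict String (List Int) :=
    (PySem.List.enumerate photo).foldl (fun occ p =>
      (PySem.Set.ofList p.2).foldl (fun occ k => occ.modify k [] (· ++ [p.1])) occ)
      PySem.Dict.empty with hocc
  have hoccD : ∀ k : String, occ.getD k []
      = ((PySem.List.enumerate photo).filter (fun p => decide (k ∈ p.2))).map (·.1) := by
    intro k
    rw [hocc, build_getD]
    simp
  obtain ⟨flen, fpt⟩ := items_scatter_getD photo occ
    (fun k i hi => by
      rw [hoccD k] at hi
      exact ⟨(R_mem photo k i hi).1, (R_mem photo k i hi).2.1⟩)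
    (fun k jn hjn => by rw [hoccD k]; exact R_count photo k jn hjn)
    dt.items (List.replicate photo.length 0) (by simp)
  apply List.ext_getElem
  · rw [List.length_map, flen, List.length_replicate]
  · intro jn h1 h2
    have hjn : jn < photo.length := by simpa using h1
    have hjn' : jn < (List.replicate photo.length (0 : Int)).length := by simpa using hjn
    have hval := fpt jn hjn'
    rw [List.getD_eq_getElem _ _ h2] at hval
    rw [hval, List.getD_eq_getElem _ _ hjn']
    simp only [List.getElem_replicate, List.getElem_map, zero_add]
    rw [show photo[jn] = photo.getD jn [] from (List.getD_eq_getElem _ _ hjn).symm, hdt]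
    exact core name yearning (photo.getD jn [])
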